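-- pv_equiv track=rewrite | github.com/FerreDemolUCLL/coursematerial_2425 | 07-tuples/11-assignment-heatwave/student.py | heatwave
-- ===== SOURCE A (Python) =====
-- def heatwave(temps):
--     twentyfive = 0
--     thirty = 0
--
--     for temp in temps:
--         if temp >= 25:
--             twentyfive += 1
--             if temp >= 30:
--                 thirty += 1
--         else:
--             twentyfive = 0
--             thirty = 0
--
--         if twentyfive >= 5 and thirty >= 3:
--             return True
--     return False
-- ===== SOURCE B (Python) =====
-- def heatwave(temps):
--     # Phase 1: split into maximal runs of consecutive days with temp >= 25.
--     runs = []
--     cur = []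
--     for t in temps:
--         if t >= 25:
--             cur.append(t)
--         else:
--             if cur:
--                 runs.append(cur)
--             cur = []
--     if cur:
--         runs.append(cur)
--     # Phase 2: a heatwave exists iff some run is long and hot enough.
--     return any(len(r) >= 5 and sum(1 for t in r if t >= 30) >= 3 for r in runs)
-- ===== Notes on version B (the rewrite author's own statement) =====
-- stated objective: alternative
-- what changed: Replaces A's running-counter scan with early return by a two-phase decomposition: first materialize the maximal runs of consecutive days >= 25, then a separate any() pass checks whole runs for length >= 5 and at least 3 days >= 30.
import Mathlib
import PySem

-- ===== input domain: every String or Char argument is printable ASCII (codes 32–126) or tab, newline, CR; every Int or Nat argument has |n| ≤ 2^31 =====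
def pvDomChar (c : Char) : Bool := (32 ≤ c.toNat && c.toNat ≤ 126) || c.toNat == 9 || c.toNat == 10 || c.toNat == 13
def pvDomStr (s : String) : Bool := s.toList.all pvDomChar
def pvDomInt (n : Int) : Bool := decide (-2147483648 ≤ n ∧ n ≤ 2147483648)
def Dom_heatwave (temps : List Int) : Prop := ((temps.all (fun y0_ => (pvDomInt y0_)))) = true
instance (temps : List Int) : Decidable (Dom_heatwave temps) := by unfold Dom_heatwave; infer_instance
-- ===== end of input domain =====

-- B re-implements A by a two-phase decomposition (materialize runs ≥25, then check whole runs); no speed claim.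

-- ===== PORT A =====
-- A's loop over temps carrying the two running counters, with early return True.
def heatwaveAux : List Int → Int → Int → Bool
  | [], _, _ => false
  | temp :: ts, twentyfive, thirty =>
    let tf := if 25 ≤ temp then twentyfive + 1 else 0
    let th := if 25 ≤ temp then (if 30 ≤ temp then thirty + 1 else thirty) else 0
    if 5 ≤ tf ∧ 3 ≤ th then true else heatwaveAux ts tf th

def heatwave (temps : List Int) : Bool := heatwaveAux temps 0 0

-- ===== PORT B =====
-- Phase 1 of Source B: split temps into maximal runs of consecutive days with temp ≥ 25
-- (cur is the run currently being built; final flush at the end of the list).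
def runsAux : List Int → List Int → List (List Int)
  | [], cur => if cur.isEmpty then [] else [cur]
  | t :: ts, cur =>
    if 25 ≤ t then runsAux ts (cur ++ [t])
    else if cur.isEmpty then runsAux ts [] else cur :: runsAux ts []

-- Phase 2 of Source B: any(len(r) >= 5 and sum(1 for t in r if t >= 30) >= 3 for r in runs)
def hotRun (r : List Int) : Bool := decide (5 ≤ r.length ∧ 3 ≤ r.countP (fun t => 30 ≤ t))

def heatwave_alt (temps : List Int) : Bool := (runsAux temps []).any hotRun

-- ===== PRECONDITION & SPEC =====
def Spec_heatwave (temps : List Int) (out : Bool) : Prop := out = heatwave_alt temps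
instance (temps : List Int) (out : Bool) : Decidable (Spec_heatwave temps out) := by unfold Spec_heatwave; infer_instance

-- ===== CLAIM (what is proved, stated in full; the proofs are below) =====
def Claim_equal_heatwave : Prop := ∀ (temps : List Int), Dom_heatwave temps → Spec_heatwave temps (heatwave temps)

-- ===== LEMMAS AND PROOFS =====

-- If the run built so far already qualifies, the whole run containing it qualifies:
-- B returns true from this state.
theorem runsAux_of_hot (ts : List Int) (cur : List Int)
    (h : 5 ≤ cur.length ∧ 3 ≤ cur.countP (fun t => 30 ≤ t)) :
    (runsAux ts cur).any hotRun = true := by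
  induction ts generalizing cur with
  | nil =>
    have hne : cur.isEmpty = false := by
      cases cur with
      | nil => simp at h
      | cons a l => rfl
    simp [runsAux, hne, hotRun, h.1, h.2]
  | cons t ts ih =>
    by_cases ht : 25 ≤ t
    · simp only [runsAux, if_pos ht]
      apply ih
      constructor
      · simpa using Nat.le_succ_of_le h.1
      · have := h.2
        rw [List.countP_append]
        omega
    · have hne : cur.isEmpty = false := by
        cases cur with
        | nil => simp at h
        | cons a l => rfl
      simp [runsAux, if_neg ht, hne, List.any_cons, hotRun, h.1, h.2]

-- Main invariant: A's counters describe the run currently being built by B.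
theorem aux_eq (ts : List Int) (cur : List Int)
    (hnot : ¬ (5 ≤ cur.length ∧ 3 ≤ cur.countP (fun t => 30 ≤ t))) :
    heatwaveAux ts (cur.length : Int) (cur.countP (fun t => 30 ≤ t) : Int)
      = (runsAux ts cur).any hotRun := by
  induction ts generalizing cur with
  | nil =>
    by_cases hne : cur.isEmpty
    · simp [heatwaveAux, runsAux, hne]
    · simp only [heatwaveAux, runsAux, hne]
      simp [List.any_cons, hotRun, hnot]
  | cons t ts ih =>
    by_cases ht : 25 ≤ t
    · by_cases hth : 30 ≤ t
      · -- counters after this step = counters of cur ++ [t]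
        have h1 : ((cur ++ [t]).length : Int) = (cur.length : Int) + 1 := by simp
        have h2 : ((cur ++ [t]).countP (fun x => 30 ≤ x) : Int)
            = (cur.countP (fun x => 30 ≤ x) : Int) + 1 := by
          rw [List.countP_append]; simp [hth]
        by_cases htrig : 5 ≤ (cur.length : Int) + 1 ∧ 3 ≤ (cur.countP (fun x => 30 ≤ x) : Int) + 1
        · have hB : (runsAux ts (cur ++ [t])).any hotRun = true := by
            apply runsAux_of_hot
            constructor
            · have := htrig.1; simp; omega
            · rw [List.countP_append]; simp [hth]; omega
          simp [heatwaveAux, runsAux, ht, hth, htrig, hB]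
        · have hnot' : ¬ (5 ≤ (cur ++ [t]).length ∧ 3 ≤ (cur ++ [t]).countP (fun x => 30 ≤ x)) := by
            intro hc
            apply htrig
            constructor
            · have := hc.1; push_cast at *; omega
            · have := hc.2
              have : ((cur ++ [t]).countP (fun x => 30 ≤ x) : Int) ≥ 3 := by exact_mod_cast hc.2
              omega
          have := ih (cur ++ [t]) hnot'
          rw [h1, h2] at this
          simp only [heatwaveAux, runsAux, ht, hth, if_pos, if_neg htrig]
          simpa using this
      · have h1 : ((cur ++ [t]).length : Int) = (cur.length : Int) + 1 := by simp
        have h2 : ((cur ++ [t]).countP (fun x => 30 ≤ x) : Int)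
            = (cur.countP (fun x => 30 ≤ x) : Int) := by
          rw [List.countP_append]; simp [hth]
        by_cases htrig : 5 ≤ (cur.length : Int) + 1 ∧ 3 ≤ (cur.countP (fun x => 30 ≤ x) : Int)
        · have hB : (runsAux ts (cur ++ [t])).any hotRun = true := by
            apply runsAux_of_hot
            constructor
            · have := htrig.1; simp; omega
            · rw [List.countP_append]; simp [hth]
              have := htrig.2; omega
          simp [heatwaveAux, runsAux, ht, hth, htrig, hB]
        · have hnot' : ¬ (5 ≤ (cur ++ [t]).length ∧ 3 ≤ (cur ++ [t]).countP (fun x => 30 ≤ x)) := by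
            intro hc
            apply htrig
            constructor
            · have := hc.1; push_cast at *; omega
            · have : ((cur ++ [t]).countP (fun x => 30 ≤ x) : Int) ≥ 3 := by exact_mod_cast hc.2
              omega
          have := ih (cur ++ [t]) hnot'
          rw [h1, h2] at this
          simp only [heatwaveAux, runsAux, ht, hth]
          simp [this]
          intro h5 h3
          exact absurd ⟨h5, by exact_mod_cast h3⟩ htrig
    · -- reset branch
      have hnot0 : ¬ (5 ≤ ([] : List Int).length ∧ 3 ≤ ([] : List Int).countP (fun t => 30 ≤ t)) := by
        simp
      have hrec := ih ([] : List Int) hnot0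
      simp only [List.length_nil, List.countP_nil, Nat.cast_zero] at hrec
      by_cases hne : cur.isEmpty
      · simp only [heatwaveAux, runsAux, if_neg ht, if_pos hne]
        simpa using hrec
      · have hcurhot : hotRun cur = false := by
          simp [hotRun]; omega
        simp only [heatwaveAux, runsAux, if_neg ht, if_neg hne, List.any_cons, hcurhot]
        simpa using hrec

-- ===== VERDICT (by name: the statement is the Claim_ definition above) =====
theorem heatwave_spec : Claim_equal_heatwave := by
  intro temps _
  unfold Spec_heatwave heatwave heatwave_alt
  have := aux_eq temps [] (by simp)
  simpa using this
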